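-- pv_equiv track=rewrite | github.com/mantidproject/mantid | scripts/Muon/GUI/ElementalAnalysis/LoadWidget/load_utils.py | hyphenise
-- ===== SOURCE A (Python) =====
-- def hyphenise(vals):
--     out = []
--     if vals:
--         vals = [str(val) for val in sorted(list(set(vals)))]
--         diffs = [int(vals[i + 1]) - int(vals[i]) for i in range(len(vals) - 1)]
--         first = last = vals[0]
--         for i, diff in enumerate(diffs):
--             if diff != 1:
--                 out.append("-".join([first, last]) if first != last else first)
--                 first = vals[i + 1]
--             last = vals[i + 1]
--         out.append("-".join([first, last]) if first != last else vals[-1])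
--     return ", ".join(out)
-- ===== SOURCE B (Python) =====
-- def hyphenise(vals):
--     if not vals:
--         return ""
--     s = set(vals)
--     xs = sorted(s)
--     starts = [v for v in xs if v - 1 not in s]
--     ends = [v for v in xs if v + 1 not in s]
--     return ", ".join(
--         str(a) if a == b else "{}-{}".format(a, b) for a, b in zip(starts, ends)
--     )
-- ===== Notes on version B (the rewrite author's own statement) =====
-- stated objective: alternative
-- what changed: B detects runs by set membership (v starts a run iff v-1 is not in the set, ends one iff v+1 is not in the set) and zips the start list with the end list, instead of A's stateful first/last sweep over an index-based diffs list of re-parsed strings.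
import Mathlib
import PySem

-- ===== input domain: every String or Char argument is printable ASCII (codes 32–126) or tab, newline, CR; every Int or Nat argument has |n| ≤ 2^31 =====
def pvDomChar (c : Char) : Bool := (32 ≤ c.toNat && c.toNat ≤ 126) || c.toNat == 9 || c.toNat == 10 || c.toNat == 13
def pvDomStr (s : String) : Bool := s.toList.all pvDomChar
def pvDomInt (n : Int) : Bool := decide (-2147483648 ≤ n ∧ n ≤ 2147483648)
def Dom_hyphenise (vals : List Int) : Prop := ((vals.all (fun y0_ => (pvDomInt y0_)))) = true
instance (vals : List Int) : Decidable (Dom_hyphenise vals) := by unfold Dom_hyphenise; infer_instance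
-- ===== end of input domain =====

-- B detects runs by set membership (v starts a run iff v-1 ∉ set, ends one iff v+1 ∉ set) and zips
-- the start list with the end list, instead of A's stateful first/last sweep over a diffs list
-- (objective: alternative).

-- ===== PORT A =====
def hyphenise (vals : List Int) : String :=
  let out : List String := []
  let out :=
    if vals ≠ [] then
      let xs := PySem.List.sorted (PySem.Set.ofList vals) (fun x => x) false
      let svals := xs.map PySem.Int.toStr
      -- diffs = [int(vals[i+1]) - int(vals[i]) for i in range(len(vals)-1)]. The int() calls are
      -- ported by hand: svals[j] is str(v) for the integer v = xs[j], and int(str(v)) == v exactly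
      -- in Python for every int v, so each parse-back is ported as the integer xs[j] itself.
      let diffs := (List.range (svals.length - 1)).map
        (fun i => xs.getD (i + 1) 0 - xs.getD i 0)
      let first := PySem.List.pyGetD svals 0 ""
      let last := first
      let st := (PySem.List.enumerate diffs 0).foldl
        (fun (st : List String × String × String) (p : Int × Int) =>
          if p.2 ≠ 1 then
            (st.1 ++ [if st.2.1 ≠ st.2.2 then PySem.Str.join "-" [st.2.1, st.2.2] else st.2.1],
             PySem.List.pyGetD svals (p.1 + 1) "",
             PySem.List.pyGetD svals (p.1 + 1) "")
          else (st.1, st.2.1, PySem.List.pyGetD svals (p.1 + 1) ""))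
        (out, first, last)
      st.1 ++ [if st.2.1 ≠ st.2.2 then PySem.Str.join "-" [st.2.1, st.2.2]
               else PySem.List.pyGetD svals (-1) ""]
    else out
  PySem.Str.join ", " out

-- ===== PORT B =====
def hyphenise_alt (vals : List Int) : String :=
  if vals = [] then ""
  else
    let s := PySem.Set.ofList vals
    let xs := PySem.List.sorted s (fun x => x) false
    let starts := xs.filter (fun v => !decide ((v - 1) ∈ s))
    let ends := xs.filter (fun v => !decide ((v + 1) ∈ s))
    PySem.Str.join ", "
      ((starts.zip ends).map (fun q =>
        if q.1 = q.2 then PySem.Int.toStr q.1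
        else PySem.Int.toStr q.1 ++ "-" ++ PySem.Int.toStr q.2))

-- ===== PRECONDITION & SPEC =====
def Spec_hyphenise (vals : List Int) (out : String) : Prop := out = hyphenise_alt vals
instance (vals : List Int) (out : String) : Decidable (Spec_hyphenise vals out) := by unfold Spec_hyphenise; infer_instance

-- ===== CLAIM (what is proved, stated in full; the proofs are below) =====
def Claim_equal_hyphenise : Prop := ∀ (vals : List Int), Dom_hyphenise vals → Spec_hyphenise vals (hyphenise vals)

-- ===== LEMMAS AND PROOFS =====

theorem digitChar_inj (m n : Nat) (hm : m < 10) (hn : n < 10)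
    (h : Nat.digitChar m = Nat.digitChar n) : m = n := by
  interval_cases m <;> interval_cases n <;> simp_all [Nat.digitChar]

theorem toDigits_step (m : Nat) (h : 10 ≤ m) :
    Nat.toDigits 10 m = Nat.toDigits 10 (m / 10) ++ [Nat.digitChar (m % 10)] := by
  conv_lhs => rw [show m = 10 * (m / 10) + m % 10 by omega]
  rw [show [Nat.digitChar (m % 10)] = Nat.toDigits 10 (m % 10) from
        (Nat.toDigits_of_lt_base (by omega)).symm,
      Nat.toDigits_append_toDigits (by norm_num) (by omega) (by omega)]

theorem toDigits_ten_inj (m n : Nat) (h : Nat.toDigits 10 m = Nat.toDigits 10 n) : m = n := by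
  induction m using Nat.strong_induction_on generalizing n with
  | _ m ih =>
    by_cases hm : m < 10 <;> by_cases hn : n < 10
    · rw [Nat.toDigits_of_lt_base hm, Nat.toDigits_of_lt_base hn] at h
      exact digitChar_inj m n hm hn (by simpa using h)
    · exfalso
      rw [Nat.toDigits_of_lt_base hm, toDigits_step n (by omega)] at h
      have := Nat.length_toDigits_pos (b := 10) (n := n / 10)
      have h9 := congrArg List.length h
      simp only [List.length_append, List.length_cons, List.length_nil] at h9; omega
    · exfalso
      rw [Nat.toDigits_of_lt_base hn, toDigits_step m (by omega)] at h
      have := Nat.length_toDigits_pos (b := 10) (n := m / 10)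
      have h9 := congrArg List.length h
      simp only [List.length_append, List.length_cons, List.length_nil] at h9; omega
    · rw [toDigits_step m (by omega), toDigits_step n (by omega)] at h
      have h2 := List.append_inj' h (by simp)
      have e1 : m / 10 = n / 10 := ih (m / 10) (by omega) (n / 10) (h2.1)
      have e2 : m % 10 = n % 10 := by
        have := h2.2
        simp at this
        exact digitChar_inj _ _ (by omega) (by omega) this
      omega

theorem toChars_head_digit (n : Nat) : ∃ c t, Nat.toDigits 10 n = c :: t ∧ c.isDigit := by
  have hl := Nat.length_toDigits_pos (b := 10) (n := n)
  cases hh : Nat.toDigits 10 n with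
  | nil => simp [hh] at hl
  | cons c t => exact ⟨c, t, rfl, Nat.isDigit_of_mem_toDigits (by norm_num) (by norm_num)
      (hh ▸ List.mem_cons_self)⟩

theorem toStr_inj (a b : Int) (h : PySem.Int.toStr a = PySem.Int.toStr b) : a = b := by
  have h2 : PySem.Int.toChars a = PySem.Int.toChars b := by
    rw [← PySem.Int.toList_toStr, ← PySem.Int.toList_toStr, h]
  unfold PySem.Int.toChars at h2
  obtain ⟨ca, ta, hta, hda⟩ := toChars_head_digit a.natAbs
  obtain ⟨cb, tb, htb, hdb⟩ := toChars_head_digit b.natAbs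
  split_ifs at h2 with h3 h4 h4
  · simp at h2
    have := toDigits_ten_inj _ _ h2
    omega
  · rw [hta] at h2
    rw [show b.toNat = b.natAbs by omega, htb] at h2
    simp at h2
    obtain ⟨h5, -⟩ := h2
    rw [← h5] at hdb
    simp [Char.isDigit] at hdb
  · rw [htb] at h2
    rw [show a.toNat = a.natAbs by omega, hta] at h2
    simp at h2
    obtain ⟨h5, -⟩ := h2
    rw [h5] at hda
    simp [Char.isDigit] at hda
  · have := toDigits_ten_inj _ _ h2
    omega

theorem join_pair (a b : String) : PySem.Str.join "-" [a, b] = a ++ "-" ++ b := by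
  simp only [PySem.Str.join, String.reduceToList, List.map_cons, List.map_nil,
    PySem.Chars.join_cons_cons, PySem.Chars.join_singleton, String.ofList_append,
    String.ofList_toList]

-- rendering of one run (proof vocabulary; matches the inline lambda of B's port)
def runStr (start prev : Int) : String :=
  if start = prev then PySem.Int.toStr start
  else PySem.Int.toStr start ++ "-" ++ PySem.Int.toStr prev

-- A's loop body after the index-dependent reads have been resolved (proofs below resolve them)
def bodyA (st : List String × String × String) (q : Int × Int) : List String × String × String :=
  if q.2 - q.1 ≠ 1 then
    (st.1 ++ [if st.2.1 ≠ st.2.2 then PySem.Str.join "-" [st.2.1, st.2.2] else st.2.1],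
     PySem.Int.toStr q.2, PySem.Int.toStr q.2)
  else (st.1, st.2.1, PySem.Int.toStr q.2)

-- the same loop on the integers themselves (intermediate vocabulary between A and the runs view)
def bodyB (st : List String × Int × Int) (v : Int) : List String × Int × Int :=
  if v = st.2.2 + 1 then (st.1, st.2.1, v)
  else (st.1 ++ [runStr st.2.1 st.2.2], v, v)

theorem enumerate_map {α β : Type} (f : α → β) (l : List α) (s : Int) :
    PySem.List.enumerate (l.map f) s
      = (PySem.List.enumerate l s).map (fun p => (p.1, f p.2)) := by
  induction l generalizing s with
  | nil => simp [PySem.List.enumerate_nil]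
  | cons x t ih => simp [PySem.List.enumerate_cons, ih]

-- the central loop correspondence: A's pair fold vs the integer fold
theorem loop_eq (t : List Int) (p s : Int) (out : List String) :
    ((p :: t).zip t).foldl bodyA (out, PySem.Int.toStr s, PySem.Int.toStr p)
      = ((t.foldl bodyB (out, s, p)).1,
         PySem.Int.toStr (t.foldl bodyB (out, s, p)).2.1,
         PySem.Int.toStr (t.foldl bodyB (out, s, p)).2.2)
    ∧ (t.foldl bodyB (out, s, p)).2.2 = (p :: t).getLast (by simp) := by
  induction t generalizing p s out with
  | nil => simp
  | cons v t' ih =>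
    have hzip : ((p :: v :: t').zip (v :: t')) = (p, v) :: ((v :: t').zip t') := rfl
    rw [hzip]
    by_cases hv : v = p + 1
    · have hA : bodyA (out, PySem.Int.toStr s, PySem.Int.toStr p) (p, v)
          = (out, PySem.Int.toStr s, PySem.Int.toStr v) := by
        simp [bodyA, hv]
      have hB : bodyB (out, s, p) v = (out, s, v) := by simp [bodyB, hv]
      simp only [List.foldl_cons, hA, hB]
      have := ih v s out
      refine ⟨this.1, ?_⟩
      rw [this.2]
      simp [List.getLast_cons]
    · have hne : v - p ≠ 1 := by omega
      have hA : bodyA (out, PySem.Int.toStr s, PySem.Int.toStr p) (p, v)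
          = (out ++ [runStr s p], PySem.Int.toStr v, PySem.Int.toStr v) := by
        simp only [bodyA, hne, if_pos, ne_eq, not_false_iff]
        by_cases hsp : s = p
        · simp [hsp, runStr]
        · have hts : PySem.Int.toStr s ≠ PySem.Int.toStr p := fun hc => hsp (toStr_inj _ _ hc)
          simp [hts, runStr, hsp, join_pair]
      have hB : bodyB (out, s, p) v = (out ++ [runStr s p], v, v) := by
        simp [bodyB, hv]
      simp only [List.foldl_cons, hA, hB]
      have := ih v v (out ++ [runStr s p])
      refine ⟨this.1, ?_⟩
      rw [this.2]
      simp [List.getLast_cons]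

theorem diffs_eq (xs : List Int) :
    (List.range ((xs.map PySem.Int.toStr).length - 1)).map
        (fun i => xs.getD (i + 1) 0 - xs.getD i 0)
      = (xs.zip (xs.drop 1)).map (fun q => q.2 - q.1) := by
  apply List.ext_getElem
  · simp
  · intro i h1 h2
    simp only [List.getElem_map, List.getElem_range, List.getElem_zip, List.getElem_drop]
    simp only [List.length_map, List.length_range] at h1
    rw [List.getD_eq_getElem _ _ (by omega), List.getD_eq_getElem _ _ (by omega)]
    simp [Nat.add_comm]

theorem diffs_eq' (x0 : Int) (t : List Int) :
    (List.range ((List.map PySem.Int.toStr (x0 :: t)).length - 1)).map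
        (fun i => (x0 :: t).getD (i + 1) 0 - (x0 :: t).getD i 0)
      = ((x0 :: t).zip t).map (fun q => q.2 - q.1) := by
  have := diffs_eq (x0 :: t)
  simpa using this

theorem A_fold_eq (x0 : Int) (t : List Int) :
    List.foldl (fun (st : List String × String × String) (p : Int × Int) =>
        if ¬p.2 = 1 then
          (st.1 ++ [if ¬st.2.1 = st.2.2 then PySem.Str.join "-" [st.2.1, st.2.2] else st.2.1],
           PySem.List.pyGetD (List.map PySem.Int.toStr (x0 :: t)) (p.1 + 1) "",
           PySem.List.pyGetD (List.map PySem.Int.toStr (x0 :: t)) (p.1 + 1) "")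
        else (st.1, st.2.1, PySem.List.pyGetD (List.map PySem.Int.toStr (x0 :: t)) (p.1 + 1) ""))
      ([], PySem.Int.toStr x0, PySem.Int.toStr x0)
      (PySem.List.enumerate
        ((List.range ((List.map PySem.Int.toStr (x0 :: t)).length - 1)).map
          (fun i => (x0 :: t).getD (i + 1) 0 - (x0 :: t).getD i 0)) 0)
    = ((x0 :: t).zip t).foldl bodyA ([], PySem.Int.toStr x0, PySem.Int.toStr x0) := by
  rw [diffs_eq', enumerate_map, List.foldl_map]
  rw [PySem.List.foldl_congr_mem _ _ (fun st p => bodyA st p.2) _ ?hmem]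
  case hmem =>
    intro acc p hp
    rw [PySem.List.mem_enumerate_iff] at hp
    obtain ⟨k, hk, rfl⟩ := hp
    have hkt : k < t.length := by
      simpa [List.length_zip] using hk
    have hidx : (0 : Int) + (k : Int) + 1 = ((k + 1 : Nat) : Int) := by push_cast; ring
    simp only [hidx, PySem.List.pyGetD_natCast]
    rw [List.getD_eq_getElem _ _ (by simpa using Nat.succ_lt_succ hkt)]
    simp [bodyA, List.getElem_zip]
  conv_rhs => rw [← PySem.List.map_snd_enumerate ((x0 :: t).zip t) 0]
  rw [List.foldl_map]

theorem A_norm (vals : List Int) (x0 : Int) (t : List Int)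
    (hxt : PySem.List.sorted (PySem.Set.ofList vals) (fun x => x) false = x0 :: t)
    (hv : vals ≠ []) :
    hyphenise vals =
      PySem.Str.join ", "
        ((((x0 :: t).zip t).foldl bodyA ([], PySem.Int.toStr x0, PySem.Int.toStr x0)).1 ++
         [if (((x0 :: t).zip t).foldl bodyA ([], PySem.Int.toStr x0, PySem.Int.toStr x0)).2.1 ≠
             (((x0 :: t).zip t).foldl bodyA ([], PySem.Int.toStr x0, PySem.Int.toStr x0)).2.2
          then PySem.Str.join "-"
                 [(((x0 :: t).zip t).foldl bodyA ([], PySem.Int.toStr x0, PySem.Int.toStr x0)).2.1,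
                  (((x0 :: t).zip t).foldl bodyA ([], PySem.Int.toStr x0, PySem.Int.toStr x0)).2.2]
          else PySem.Int.toStr ((x0 :: t).getLast (by simp))]) := by
  unfold hyphenise
  simp only [ne_eq, hv, not_false_eq_true, if_true, hxt]
  have hfirst : PySem.List.pyGetD (List.map PySem.Int.toStr (x0 :: t)) 0 "" = PySem.Int.toStr x0 := by
    simp [PySem.List.pyGetD_zero_cons]
  have hlast : PySem.List.pyGetD (List.map PySem.Int.toStr (x0 :: t)) (-1) ""
      = PySem.Int.toStr ((x0 :: t).getLast (by simp)) := by
    rw [PySem.List.pyGetD_neg_one (List.map PySem.Int.toStr (x0 :: t)) "" (by simp)]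
    exact List.getLast_map (by simp)
  rw [hfirst, hlast, A_fold_eq x0 t]

-- the maximal runs of the (strictly increasing) list p :: t, as (start, end) pairs
def runs (s p : Int) : List Int → List (Int × Int)
  | [] => [(s, p)]
  | v :: t => if v = p + 1 then runs s v t else (s, p) :: runs v v t

-- the fold result, rendered, is exactly the rendered runs
theorem fold_runs (t : List Int) : ∀ (s p : Int) (out : List String),
    (t.foldl bodyB (out, s, p)).1
        ++ [runStr (t.foldl bodyB (out, s, p)).2.1 (t.foldl bodyB (out, s, p)).2.2]
      = out ++ (runs s p t).map (fun q => runStr q.1 q.2) := by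
  induction t with
  | nil => intro s p out; simp [runs]
  | cons v t' ih =>
    intro s p out
    by_cases hv : v = p + 1
    · subst hv
      have hB : bodyB (out, s, p) (p + 1) = (out, s, p + 1) := by simp [bodyB]
      have hR : runs s p ((p + 1) :: t') = runs s (p + 1) t' := by simp [runs]
      rw [List.foldl_cons, hB, hR]
      exact ih s (p + 1) out
    · have hB : bodyB (out, s, p) v = (out ++ [runStr s p], v, v) := by simp [bodyB, hv]
      have hR : runs s p (v :: t') = (s, p) :: runs v v t' := by simp [runs, hv]
      rw [List.foldl_cons, hB, hR, ih v v (out ++ [runStr s p])]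
      simp

-- the first run of 'runs s p t' starts at s; everything else ignores s
theorem runs_shape (t : List Int) : ∀ (s p : Int),
    ∃ e rest, runs s p t = (s, e) :: rest ∧ ∀ s', runs s' p t = (s', e) :: rest := by
  induction t with
  | nil => intro s p; exact ⟨p, [], rfl, fun _ => rfl⟩
  | cons v t' ih =>
    intro s p
    by_cases hv : v = p + 1
    · subst hv
      obtain ⟨e, rest, h1, h2⟩ := ih s (p + 1)
      refine ⟨e, rest, ?_, fun s' => ?_⟩
      · rw [show runs s p ((p + 1) :: t') = runs s (p + 1) t' by simp [runs]]; exact h1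
      · rw [show runs s' p ((p + 1) :: t') = runs s' (p + 1) t' by simp [runs]]; exact h2 s'
    · exact ⟨p, runs v v t', by simp [runs, hv], fun s' => by simp [runs, hv]⟩

-- run starts by membership: v starts a run iff v-1 is absent
theorem starts_eq (t : List Int) : ∀ (x0 : Int), (x0 :: t).Pairwise (· < ·) →
    (x0 :: t).filter (fun v => !decide ((v - 1) ∈ (x0 :: t)))
      = (runs x0 x0 t).map Prod.fst := by
  induction t with
  | nil =>
    intro x0 _
    have h : ¬ (x0 - 1) ∈ [x0] := by
      intro hc
      have : x0 - 1 = x0 := by simpa using hc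
      omega
    simp [runs, List.filter_cons, h]
  | cons v t' ih =>
    intro x0 hpw
    obtain ⟨hx0, hpw'⟩ := List.pairwise_cons.mp hpw
    obtain ⟨hv', _⟩ := List.pairwise_cons.mp hpw'
    have hx0v : x0 < v := hx0 v (by simp)
    have hhead : ¬ (x0 - 1) ∈ (x0 :: v :: t') := by
      simp only [List.mem_cons]
      rintro (h | h | h)
      · omega
      · omega
      · have := hv' _ h; omega
    have hh1 : ¬ x0 - 1 = x0 := by omega
    have hh2 : ¬ x0 - 1 = v := by omega
    have hh3 : x0 - 1 ∉ t' := fun h => by have := hv' _ h; omega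
    have e0 : (x0 :: v :: t').filter (fun w => !decide ((w - 1) ∈ (x0 :: v :: t')))
        = x0 :: (v :: t').filter (fun w => !decide ((w - 1) ∈ (x0 :: v :: t'))) := by
      simp [List.filter_cons, hh1, hh2, hh3]
    have hcongr : ∀ w ∈ t',
        (!decide ((w - 1) ∈ (x0 :: v :: t'))) = (!decide ((w - 1) ∈ (v :: t'))) := by
      intro w hw
      have h1 : v < w := hv' w hw
      have h2 : ¬ w - 1 = x0 := by omega
      simp only [List.mem_cons, h2, false_or]
    have e2 : t'.filter (fun w => !decide ((w - 1) ∈ (x0 :: v :: t')))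
        = t'.filter (fun w => !decide ((w - 1) ∈ (v :: t'))) := List.filter_congr hcongr
    have hIH := ih v hpw'
    have hvT1 : ¬ v - 1 = v := by omega
    have hvT2 : v - 1 ∉ t' := fun h => by have := hv' _ h; omega
    have e3 : (v :: t').filter (fun w => !decide ((w - 1) ∈ (v :: t')))
        = v :: t'.filter (fun w => !decide ((w - 1) ∈ (v :: t'))) := by
      simp [List.filter_cons, hvT1, hvT2]
    by_cases hadj : v = x0 + 1
    · have hvx : v - 1 = x0 := by omega
      have e1 : (v :: t').filter (fun w => !decide ((w - 1) ∈ (x0 :: v :: t')))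
          = t'.filter (fun w => !decide ((w - 1) ∈ (x0 :: v :: t'))) := by
        simp [List.filter_cons, hvx]
      obtain ⟨e, rest, h1, h2⟩ := runs_shape t' v v
      have hRuns : runs x0 x0 (v :: t') = (x0, e) :: rest := by
        rw [show runs x0 x0 (v :: t') = runs x0 v t' by simp [runs, hadj]]
        exact h2 x0
      have htailIH : t'.filter (fun w => !decide ((w - 1) ∈ (v :: t'))) = rest.map Prod.fst := by
        rw [e3, h1] at hIH
        rw [List.map_cons] at hIH
        exact (List.cons.inj hIH).2
      rw [e0, e1, e2, htailIH, hRuns]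
      simp
    · have hf1 : ¬ v - 1 = x0 := by omega
      have hf2 : ¬ v - 1 = v := by omega
      have hf3 : v - 1 ∉ t' := fun h => by have := hv' _ h; omega
      have e1 : (v :: t').filter (fun w => !decide ((w - 1) ∈ (x0 :: v :: t')))
          = v :: t'.filter (fun w => !decide ((w - 1) ∈ (x0 :: v :: t'))) := by
        simp [List.filter_cons, hf1, hf2, hf3]
      have hRuns : runs x0 x0 (v :: t') = (x0, x0) :: runs v v t' := by
        simp [runs, hadj]
      rw [e0, e1, e2, hRuns]
      rw [e3] at hIH
      simp only [List.map_cons]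
      exact congrArg (x0 :: ·) hIH

-- run ends by membership: v ends a run iff v+1 is absent
theorem ends_eq (t : List Int) : ∀ (x0 : Int), (x0 :: t).Pairwise (· < ·) →
    (x0 :: t).filter (fun v => !decide ((v + 1) ∈ (x0 :: t)))
      = (runs x0 x0 t).map Prod.snd := by
  induction t with
  | nil =>
    intro x0 _
    have h : ¬ (x0 + 1) ∈ [x0] := by
      intro hc
      have : x0 + 1 = x0 := by simpa using hc
      omega
    simp [runs, List.filter_cons, h]
  | cons v t' ih =>
    intro x0 hpw
    obtain ⟨hx0, hpw'⟩ := List.pairwise_cons.mp hpw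
    obtain ⟨hv', _⟩ := List.pairwise_cons.mp hpw'
    have hx0v : x0 < v := hx0 v (by simp)
    have hcongr : ∀ w ∈ (v :: t'),
        (!decide ((w + 1) ∈ (x0 :: v :: t'))) = (!decide ((w + 1) ∈ (v :: t'))) := by
      intro w hw
      have h1 : v ≤ w := by
        rcases List.mem_cons.mp hw with h | h
        · omega
        · have := hv' w h; omega
      have h2 : ¬ w + 1 = x0 := by omega
      simp only [List.mem_cons, h2, false_or]
    have htail : (v :: t').filter (fun w => !decide ((w + 1) ∈ (x0 :: v :: t')))
        = (runs v v t').map Prod.snd := by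
      rw [List.filter_congr hcongr]; exact ih v hpw'
    by_cases hadj : v = x0 + 1
    · have hax : x0 + 1 = v := by omega
      have e0 : (x0 :: v :: t').filter (fun w => !decide ((w + 1) ∈ (x0 :: v :: t')))
          = (v :: t').filter (fun w => !decide ((w + 1) ∈ (x0 :: v :: t'))) := by
        simp [List.filter_cons, hax]
      obtain ⟨e, rest, h1, h2⟩ := runs_shape t' v v
      have hRuns : runs x0 x0 (v :: t') = (x0, e) :: rest := by
        rw [show runs x0 x0 (v :: t') = runs x0 v t' by simp [runs, hadj]]
        exact h2 x0
      rw [e0, htail, h1, hRuns]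
      simp
    · have hn1 : ¬ x0 + 1 = x0 := by omega
      have hn2 : ¬ x0 + 1 = v := by omega
      have hn3 : x0 + 1 ∉ t' := fun h => by have := hv' _ h; omega
      have e0 : (x0 :: v :: t').filter (fun w => !decide ((w + 1) ∈ (x0 :: v :: t')))
          = x0 :: (v :: t').filter (fun w => !decide ((w + 1) ∈ (x0 :: v :: t'))) := by
        simp [List.filter_cons, hn1, hn2, hn3]
      have hRuns : runs x0 x0 (v :: t') = (x0, x0) :: runs v v t' := by
        simp [runs, hadj]
      rw [e0, htail, hRuns]
      simp

theorem sorted_ne_nil (vals : List Int) (hv : vals ≠ []) :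
    PySem.List.sorted (PySem.Set.ofList vals) (fun x => x) false ≠ [] := by
  intro hc
  rw [PySem.List.sorted_eq_nil_iff] at hc
  cases vals with
  | nil => exact hv rfl
  | cons x vs =>
    have : x ∈ PySem.Set.ofList (x :: vs) := by
      rw [PySem.Set.mem_ofList]
      exact List.mem_cons_self
    rw [hc] at this
    simp at this

-- ===== VERDICT =====
theorem hyphenise_spec : Claim_equal_hyphenise := by
  intro vals _
  unfold Spec_hyphenise
  by_cases hv : vals = []
  · subst hv; rfl
  · obtain ⟨x0, t, hxt⟩ : ∃ x0 t,
        PySem.List.sorted (PySem.Set.ofList vals) (fun x => x) false = x0 :: t := by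
      cases hs : PySem.List.sorted (PySem.Set.ofList vals) (fun x => x) false with
      | nil => exact absurd hs (sorted_ne_nil vals hv)
      | cons a b => exact ⟨a, b, rfl⟩
    have hpw : (x0 :: t).Pairwise (· < ·) := by
      rw [← hxt]; exact PySem.List.sorted_ofList_pairwise_lt (xs := vals)
    -- A side, down to the rendered runs
    have hA : hyphenise vals
        = PySem.Str.join ", " ((runs x0 x0 t).map (fun q => runStr q.1 q.2)) := by
      rw [A_norm vals x0 t hxt hv]
      obtain ⟨h1, h2⟩ := loop_eq t x0 x0 []
      rw [h1]
      set r := t.foldl bodyB ([], x0, x0) with hr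
      have hbr : (r.1 ++ [runStr r.2.1 r.2.2])
          = [] ++ (runs x0 x0 t).map (fun q => runStr q.1 q.2) := fold_runs t x0 x0 []
      by_cases hsp : r.2.1 = r.2.2
      · simp only [hsp, ne_eq, not_true_eq_false, if_neg, not_false_iff]
        rw [← h2]
        have hrend : runStr r.2.1 r.2.2 = PySem.Int.toStr r.2.2 := by simp [runStr, hsp]
        rw [← hrend, hbr]
        simp
      · have hts : PySem.Int.toStr r.2.1 ≠ PySem.Int.toStr r.2.2 :=
          fun hc => hsp (toStr_inj _ _ hc)
        simp only [ne_eq, hts, not_false_iff, if_pos]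
        rw [join_pair]
        have hrend : runStr r.2.1 r.2.2
            = PySem.Int.toStr r.2.1 ++ "-" ++ PySem.Int.toStr r.2.2 := by simp [runStr, hsp]
        rw [← hrend, hbr]
        simp
    -- B side, down to the rendered runs
    have hmemIff : ∀ x : Int, x ∈ PySem.Set.ofList vals ↔ x ∈ (x0 :: t) := by
      intro x
      rw [← hxt]
      exact (PySem.List.mem_sorted (PySem.Set.ofList vals) (fun y => y) false x).symm
    have hstarts : (x0 :: t).filter (fun v => !decide ((v - 1) ∈ PySem.Set.ofList vals))
        = (x0 :: t).filter (fun v => !decide ((v - 1) ∈ (x0 :: t))) :=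
      List.filter_congr (fun w _ =>
        congrArg Bool.not (decide_eq_decide.mpr (hmemIff (w - 1))))
    have hends : (x0 :: t).filter (fun v => !decide ((v + 1) ∈ PySem.Set.ofList vals))
        = (x0 :: t).filter (fun v => !decide ((v + 1) ∈ (x0 :: t))) :=
      List.filter_congr (fun w _ =>
        congrArg Bool.not (decide_eq_decide.mpr (hmemIff (w + 1))))
    have hB : hyphenise_alt vals
        = PySem.Str.join ", " ((runs x0 x0 t).map (fun q => runStr q.1 q.2)) := by
      unfold hyphenise_alt
      rw [if_neg hv]
      simp only [hxt]
      rw [hstarts, hends, starts_eq t x0 hpw, ends_eq t x0 hpw, List.zip_map']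
      congr 1
      simp [List.map_map, runStr, Function.comp]
    rw [hA, hB]
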